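-- pv_equiv track=rewrite | github.com/Aloksharma8767/DSA | 2D_array/common_element_in_all_row_of _matrix.py | traverse_matrix
-- ===== SOURCE A (Python) =====
-- def count(matrix,num):
--     counter=0
--     for R in matrix:
--         if num in R:
--             counter+=1
--     return counter
--
-- def traverse_matrix(matrix):
--     if len(matrix)==0:
--         return
--     numbers=[]
--     row=len(matrix)
--     column=len(matrix[0])
--     for j in range(column):
--         num=matrix[0][j]
--         c=count(matrix,num)
--         if c==4:
--             numbers.append(matrix[0][j])
--     return numbers if len(numbers)>=0 else -1
-- ===== SOURCE B (Python) =====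
-- def traverse_matrix(matrix):
--     if len(matrix) == 0:
--         return
--     freq = {}
--     for row in matrix:
--         for v in set(row):
--             freq[v] = freq.get(v, 0) + 1
--     return [v for v in matrix[0] if freq.get(v, 0) == 4]
-- ===== Notes on version B (the rewrite author's own statement) =====
-- stated objective: alternative
-- what changed: A re-scans every row once per first-row element (nested count calls); B builds a value->row-count frequency dict in one pass over all rows and then filters the first row with dict lookups.
-- outside the precondition, e.g. on traverse_matrix([]): A returns None, B returns None
import Mathlib
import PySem

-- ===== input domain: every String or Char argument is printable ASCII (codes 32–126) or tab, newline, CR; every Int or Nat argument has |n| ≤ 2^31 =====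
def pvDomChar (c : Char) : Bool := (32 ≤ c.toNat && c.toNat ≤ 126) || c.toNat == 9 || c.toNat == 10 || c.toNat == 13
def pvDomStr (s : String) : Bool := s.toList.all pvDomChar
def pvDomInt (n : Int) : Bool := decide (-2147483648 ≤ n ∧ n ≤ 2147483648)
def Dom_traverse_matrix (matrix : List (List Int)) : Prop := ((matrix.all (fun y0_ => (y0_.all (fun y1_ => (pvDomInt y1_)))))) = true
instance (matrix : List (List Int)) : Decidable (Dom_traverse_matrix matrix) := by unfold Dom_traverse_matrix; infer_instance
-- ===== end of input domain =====

-- B replaces A's per-element rescans of all rows with one frequency dict built in a single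
-- pass over the rows, then a single filter pass over the first row (objective: alternative).


-- ===== PORT A =====
def count (matrix : List (List Int)) (num : Int) : Int :=
  matrix.foldl (fun counter R => if num ∈ R then counter + 1 else counter) 0

def traverse_matrix (matrix : List (List Int)) : List Int :=
  if matrix.length == 0 then []  -- Python returns None here; excluded by Pre_
  else
    let row0 := matrix.headD []
    let column := row0.length
    (PySem.List.pyRange 0 (column : Int) 1).foldl (fun numbers j =>
      let num := PySem.List.pyGetD row0 j 0
      let c := count matrix num
      if c == 4 then numbers ++ [num] else numbers) []

-- ===== PORT B =====
def traverse_matrix_alt (matrix : List (List Int)) : List Int :=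
  match matrix with
  | [] => []  -- Python returns None here; excluded by Pre_
  | row0 :: _ =>
    let freq : PySem.Dict Int Int :=
      matrix.foldl (fun d row =>
        (PySem.Set.ofList row).foldl (fun d v => d.insert v (d.getD v 0 + 1)) d)
        PySem.Dict.empty
    row0.filter (fun v => freq.getD v 0 == 4)

-- ===== PRECONDITION & SPEC =====
-- Pre_ excludes only the empty matrix, on which the Python A (and B) return None, not a list.
def Pre_traverse_matrix (matrix : List (List Int)) : Prop := matrix ≠ []
instance (matrix : List (List Int)) : Decidable (Pre_traverse_matrix matrix) := by unfold Pre_traverse_matrix; infer_instance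
def pvWitness_traverse_matrix : List (List Int) := [[1, 2], [1], [1], [1, 3]]

def Spec_traverse_matrix (matrix : List (List Int)) (out : List Int) : Prop := out = traverse_matrix_alt matrix
instance (matrix : List (List Int)) (out : List Int) : Decidable (Spec_traverse_matrix matrix out) := by unfold Spec_traverse_matrix; infer_instance

-- ===== CLAIM (what is proved, stated in full; the proofs are below) =====
def Claim_equal_traverse_matrix : Prop := ∀ (matrix : List (List Int)), Dom_traverse_matrix matrix → Pre_traverse_matrix matrix → Spec_traverse_matrix matrix (traverse_matrix matrix)

-- ===== LEMMAS AND PROOFS =====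

-- One row's pass: inserting v ↦ getD v + 1 for each element of a Nodup list bumps exactly
-- the members of that list by one.
theorem getD_row_pass (s : List Int) (hs : s.Nodup) (d : PySem.Dict Int Int) (v : Int) :
    (s.foldl (fun d u => d.insert u (d.getD u 0 + 1)) d).getD v 0
      = d.getD v 0 + (if v ∈ s then 1 else 0) := by
  induction s generalizing d with
  | nil => simp
  | cons u s ih =>
    simp only [List.foldl_cons]
    rcases List.nodup_cons.mp hs with ⟨hu, hs'⟩
    rw [ih hs']
    by_cases hv : v = u
    · subst hv
      rw [PySem.Dict.getD_insert_self]
      simp [hu]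
    · rw [PySem.Dict.getD_insert_of_ne _ _ _ hv]
      simp [hv]

-- The full frequency dict counts, for each value, the number of rows containing it.
theorem getD_freq (rows : List (List Int)) (d : PySem.Dict Int Int) (v : Int) :
    (rows.foldl (fun d row =>
        (PySem.Set.ofList row).foldl (fun d u => d.insert u (d.getD u 0 + 1)) d) d).getD v 0
      = d.getD v 0 + count rows v := by
  induction rows generalizing d with
  | nil => simp [count]
  | cons r rows ih =>
    simp only [List.foldl_cons]
    rw [ih, getD_row_pass _ (PySem.Set.nodup_ofList r) d v]
    simp only [PySem.Set.mem_ofList]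
    have hcount : count (r :: rows) v = (if v ∈ r then 1 else 0) + count rows v := by
      simp only [count, List.foldl_cons]
      rw [PySem.List.foldl_ite_add_one, PySem.List.foldl_ite_add_one]
      split_ifs <;> ring
    rw [hcount]
    ring

theorem traverse_matrix_spec' (matrix : List (List Int)) (h : matrix ≠ []) :
    traverse_matrix matrix = traverse_matrix_alt matrix := by
  obtain ⟨row0, rest, rfl⟩ := List.exists_cons_of_ne_nil h
  show traverse_matrix (row0 :: rest) = traverse_matrix_alt (row0 :: rest)
  have hA : traverse_matrix (row0 :: rest)
      = row0.filter (fun v => count (row0 :: rest) v == 4) := by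
    simp only [traverse_matrix, List.length_cons, List.headD_cons]
    rw [if_neg (by simp)]
    rw [PySem.List.foldl_pyRange_zero_pyGetD' row0 0
      (f := fun numbers num => if count (row0 :: rest) num == 4 then numbers ++ [num] else numbers) []]
    rw [PySem.List.foldl_append_if_eq_filter]
    simp
  have hB : traverse_matrix_alt (row0 :: rest)
      = row0.filter (fun v => count (row0 :: rest) v == 4) := by
    simp only [traverse_matrix_alt]
    apply List.filter_congr
    intro v _
    rw [getD_freq]
    simp [PySem.Dict.empty, PySem.Dict.getD, PySem.Dict.get?]
  rw [hA, hB]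

-- ===== VERDICT (by name: the statement is the Claim_ definition above) =====
theorem traverse_matrix_spec : Claim_equal_traverse_matrix := by
  intro matrix _ hpre
  exact traverse_matrix_spec' matrix hpre
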